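-- pv_equiv track=rewrite | github.com/guitouraid/my-little-aoc | settings/_2015/settings_2015_25.py | solve_santa
-- ===== SOURCE A (Python) =====
-- def next_code(code: int) -> int:
--     return (code * 252533) % 33554393
--
-- def solve_santa(row: int, col: int) -> int:
--     code = 20151125
--     rows = crow = ccol = 1
--     while crow != row or ccol != col:
--         if rows == ccol:
--             rows += 1
--             crow = rows
--             ccol = 1
--         else:
--             ccol += 1
--             crow -= 1
--         code = next_code(code)
--     return code
-- ===== SOURCE B (Python) =====
-- def solve_santa(row: int, col: int) -> int:
--     # closed form: position (row,col) is the n-th code, n = T(row+col-2) + col - 1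
--     n = (row + col - 2) * (row + col - 1) // 2 + col - 1
--     return (20151125 * pow(252533, n, 33554393)) % 33554393
-- ===== Notes on version B (the rewrite author's own statement) =====
-- stated objective: faster
-- what changed: Replaces the step-by-step diagonal walk with the triangular-number index formula plus three-argument pow (modular exponentiation).
-- outside the precondition, e.g. on solve_santa(0, 1): A does not finish within the time limit, B returns 20151125
import Mathlib
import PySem

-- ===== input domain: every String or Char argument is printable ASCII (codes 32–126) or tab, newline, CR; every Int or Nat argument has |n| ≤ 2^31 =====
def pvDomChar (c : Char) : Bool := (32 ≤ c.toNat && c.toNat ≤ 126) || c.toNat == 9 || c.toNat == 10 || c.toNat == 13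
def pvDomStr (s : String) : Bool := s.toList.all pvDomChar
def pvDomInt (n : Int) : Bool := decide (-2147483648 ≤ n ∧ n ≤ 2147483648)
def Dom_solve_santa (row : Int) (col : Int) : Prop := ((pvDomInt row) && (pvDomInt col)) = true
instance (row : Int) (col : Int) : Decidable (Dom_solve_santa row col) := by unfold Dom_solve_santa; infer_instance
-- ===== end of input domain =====

-- B replaces A's step-by-step diagonal walk with the triangular-index closed form and modular exponentiation (asymptotically faster in a timing run).


-- ===== PORT A =====
def next_code (code : Int) : Int := PySem.Int.mod (code * 252533) 33554393

-- A's while-loop as fuel recursion; the fuel is only a termination guard (it is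
-- proved sufficient, the loop always exits through its own condition inside Pre_).
def santaLoop (fuel : Nat) (row col crow ccol rows code : Int) : Int :=
  match fuel with
  | 0 => code
  | Nat.succ f =>
    if crow ≠ row ∨ ccol ≠ col then
      if rows = ccol then
        santaLoop f row col (rows + 1) 1 (rows + 1) (next_code code)
      else
        santaLoop f row col (crow - 1) (ccol + 1) rows (next_code code)
    else code

def solve_santa (row : Int) (col : Int) : Int :=
  santaLoop ((row + col) * (row + col)).toNat row col 1 1 1 20151125

-- ===== PORT B =====
def solve_santa_alt (row : Int) (col : Int) : Int :=
  let n : Int := PySem.Int.floordiv ((row + col - 2) * (row + col - 1)) 2 + col - 1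
  PySem.Int.mod (20151125 * (PySem.Int.mod (252533 ^ n.toNat) 33554393)) 33554393

-- ===== PRECONDITION & SPEC =====
-- Pre_ excludes row < 1 or col < 1, where A's while-loop never terminates (its
-- cursor only visits positions with both coordinates ≥ 1).
def Pre_solve_santa (row : Int) (col : Int) : Prop := 1 ≤ row ∧ 1 ≤ col
instance (row : Int) (col : Int) : Decidable (Pre_solve_santa row col) := by unfold Pre_solve_santa; infer_instance
def pvWitness_solve_santa : Int × Int := (3, 4)

def Spec_solve_santa (row : Int) (col : Int) (out : Int) : Prop := out = solve_santa_alt row col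
instance (row : Int) (col : Int) (out : Int) : Decidable (Spec_solve_santa row col out) := by unfold Spec_solve_santa; infer_instance

-- ===== CLAIM (what is proved, stated in full; the proofs are below) =====
def Claim_equal_solve_santa : Prop := ∀ (row : Int) (col : Int), Dom_solve_santa row col → Pre_solve_santa row col → Spec_solve_santa row col (solve_santa row col)

-- ===== LEMMAS AND PROOFS =====

-- twice the 0-based diagonal index of position (a, b)
def pvN (a b : Int) : Int := (a + b - 2) * (a + b - 1) + 2 * (b - 1)

lemma pvN_inj {a b c d : Int} (ha : 1 ≤ a) (hb : 1 ≤ b) (hc : 1 ≤ c) (hd : 1 ≤ d)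
    (h : pvN a b = pvN c d) : a = c ∧ b = d := by
  unfold pvN at h
  rcases lt_trichotomy (a + b) (c + d) with hlt | heq | hgt
  · exfalso; nlinarith
  · have hbd : b = d := by rw [heq] at h; linarith
    exact ⟨by omega, hbd⟩
  · exfalso; nlinarith

lemma pvN_jump (c : Int) : pvN (c + 1) 1 = pvN 1 c + 2 := by unfold pvN; ring

lemma pvN_step (a b : Int) : pvN (a - 1) (b + 1) = pvN a b + 2 := by unfold pvN; ring

lemma next_code_emod (code : Int) : next_code code = (code * 252533) % 33554393 := by
  unfold next_code
  exact PySem.Int.mod_eq_emod_of_pos (by norm_num)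

lemma loop_eq : ∀ (r fuel : Nat) (row col crow ccol rows code : Int),
    1 ≤ row → 1 ≤ col → 1 ≤ crow → 1 ≤ ccol →
    rows = crow + ccol - 1 →
    0 ≤ code → code < 33554393 →
    2 * (r : Int) = pvN row col - pvN crow ccol → r ≤ fuel →
    santaLoop fuel row col crow ccol rows code = (code * 252533 ^ r) % 33554393 := by
  intro r
  induction r with
  | zero =>
    intro fuel row col crow ccol rows code hr hc h1 h2 hrows h0 hM hN _
    have heq : crow = row ∧ ccol = col := by
      have := pvN_inj hr hc h1 h2 (show pvN row col = pvN crow ccol by omega)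
      exact ⟨this.1.symm, this.2.symm⟩
    have hcode : (code * 252533 ^ 0) % 33554393 = code := by
      simp [Int.emod_eq_of_lt h0 hM]
    rw [hcode]
    cases fuel with
    | zero => rfl
    | succ f =>
      simp only [santaLoop]
      rw [if_neg]
      push_neg
      exact heq
  | succ r ih =>
    intro fuel row col crow ccol rows code hr hc h1 h2 hrows h0 hM hN hfuel
    cases fuel with
    | zero => omega
    | succ f =>
      have hne : crow ≠ row ∨ ccol ≠ col := by
        by_contra h
        push_neg at h
        rw [h.1, h.2] at hN
        omega
      have hcode' : next_code code = (code * 252533) % 33554393 := next_code_emod code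
      have h0' : 0 ≤ next_code code := by
        rw [hcode']; exact Int.emod_nonneg _ (by norm_num)
      have hM' : next_code code < 33554393 := by
        rw [hcode']; exact Int.emod_lt_of_pos _ (by norm_num)
      have hpow : ((code * 252533) % 33554393 * 252533 ^ r) % 33554393
          = (code * 252533 ^ (r + 1)) % 33554393 := by
        rw [Int.mul_emod, Int.emod_emod_of_dvd _ (dvd_refl _), ← Int.mul_emod]
        congr 1
        rw [pow_succ]; ring
      simp only [santaLoop]
      rw [if_pos hne]
      by_cases hdiag : rows = ccol
      · rw [if_pos hdiag]
        have hcrow1 : crow = 1 := by omega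
        have harg : rows + 1 = ccol + 1 := by omega
        rw [harg]
        have := ih f row col (ccol + 1) 1 (ccol + 1) (next_code code)
          hr hc (by omega) (by omega) (by omega) h0' hM'
          (by rw [pvN_jump ccol]; subst hcrow1; push_cast at hN ⊢; omega)
          (by omega)
        rw [this, hcode', hpow]
      · rw [if_neg hdiag]
        have hcrow2 : 2 ≤ crow := by omega
        have := ih f row col (crow - 1) (ccol + 1) rows (next_code code)
          hr hc (by omega) (by omega) (by omega) h0' hM'
          (by rw [pvN_step crow ccol]; push_cast at hN ⊢; omega)
          (by omega)
        rw [this, hcode', hpow]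

-- ===== VERDICT (by name: the statement is the Claim_ definition above) =====
theorem solve_santa_spec : Claim_equal_solve_santa := by
  intro row col _ hpre
  obtain ⟨hr, hc⟩ := hpre
  unfold Spec_solve_santa solve_santa solve_santa_alt
  have htwo : (2 : Int) ∣ (row + col - 2) * (row + col - 1) := by
    have h := (Int.even_mul_succ_self (row + col - 2)).two_dvd
    have he : (row + col - 2) * (row + col - 2 + 1) = (row + col - 2) * (row + col - 1) := by ring
    rwa [he] at h
  have hfd : PySem.Int.floordiv ((row + col - 2) * (row + col - 1)) 2
      = ((row + col - 2) * (row + col - 1)) / 2 :=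
    PySem.Int.floordiv_eq_ediv_of_pos (by norm_num)
  set m : Int := PySem.Int.floordiv ((row + col - 2) * (row + col - 1)) 2 + col - 1 with hm
  have h2n : 2 * m = pvN row col := by
    rw [hm, hfd]
    unfold pvN
    nlinarith [Int.ediv_mul_cancel htwo]
  have hpos : 0 ≤ pvN row col := by
    unfold pvN
    nlinarith [mul_nonneg (by omega : (0:Int) ≤ row + col - 2) (by omega : (0:Int) ≤ row + col - 1)]
  have hub : pvN row col ≤ 2 * ((row + col) * (row + col)) := by
    unfold pvN; nlinarith
  have hnn : 0 ≤ m := by linarith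
  have hcast : (m.toNat : Int) = m := Int.toNat_of_nonneg hnn
  have hfuel : m.toNat ≤ ((row + col) * (row + col)).toNat := by
    apply Int.toNat_le_toNat
    linarith
  have hA := loop_eq m.toNat ((row + col) * (row + col)).toNat row col 1 1 1 20151125
    hr hc (by norm_num) (by norm_num) (by norm_num) (by norm_num) (by norm_num)
    (by rw [hcast, h2n]; unfold pvN; ring) hfuel
  show santaLoop ((row + col) * (row + col)).toNat row col 1 1 1 20151125
      = PySem.Int.mod (20151125 * (PySem.Int.mod (252533 ^ m.toNat) 33554393)) 33554393
  rw [hA]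
  rw [PySem.Int.mod_eq_emod_of_pos (by norm_num), PySem.Int.mod_eq_emod_of_pos (by norm_num)]
  conv_lhs => rw [Int.mul_emod]
  conv_rhs => rw [Int.mul_emod, Int.emod_emod_of_dvd _ (dvd_refl _)]
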